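-- pv_equiv track=rewrite | github.com/rmejie/Extracts-excel | table_extractor_gui.py | normalize_header_len
-- ===== SOURCE A (Python) =====
-- from typing import List, Dict, Tuple, Optional
--
-- def normalize_header_len(header: List[str], data_rows: List[List[str]]) -> List[str]:
--     """
--     Make sure header length matches the widest data row.
--     """
--     max_cols = max([len(header)] + [len(r) for r in data_rows] + [1])
--     new_header = header[:]
--     if len(new_header) < max_cols:
--         new_header += [f"col_{i+1}" for i in range(len(new_header), max_cols)]
--     elif len(new_header) > max_cols:
--         new_header = new_header[:max_cols]
--     # Deduplicate header names
--     seen = {}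
--     for i, name in enumerate(new_header):
--         n = name or f"col_{i+1}"
--         if n in seen:
--             seen[n] += 1
--             n = f"{n}_{seen[n]}"
--         else:
--             seen[n] = 1
--         new_header[i] = n
--     return new_header
-- ===== SOURCE B (Python) =====
-- def normalize_header_len(header, data_rows):
--     """
--     Make sure header length matches the widest data row.
--     Group-then-scatter: build the base name for every target column, group
--     the column indices by base name in one pass, then write each group's
--     suffixed names directly into a preallocated output (no running counter,
--     no pad/truncate pass).
--     """
--     max_cols = max([len(header)] + [len(r) for r in data_rows] + [1])
--     bases = [(header[i] if i < len(header) else "") or f"col_{i+1}" for i in range(max_cols)]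
--     groups = {}
--     for i, b in enumerate(bases):
--         if b in groups:
--             groups[b].append(i)
--         else:
--             groups[b] = [i]
--     out = [None] * max_cols
--     for name, idxs in groups.items():
--         for k, idx in enumerate(idxs):
--             out[idx] = name if k == 0 else f"{name}_{k+1}"
--     return out
-- ===== Notes on version B (the rewrite author's own statement) =====
-- stated objective: alternative
-- what changed: Removes A's pad/truncate pass and its running 'seen' counter: B builds each target column's base name directly, groups column indices by base name in one pass, and then scatter-writes each group's suffixed names (name, name_2, ...) into a preallocated output list.
import Mathlib
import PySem

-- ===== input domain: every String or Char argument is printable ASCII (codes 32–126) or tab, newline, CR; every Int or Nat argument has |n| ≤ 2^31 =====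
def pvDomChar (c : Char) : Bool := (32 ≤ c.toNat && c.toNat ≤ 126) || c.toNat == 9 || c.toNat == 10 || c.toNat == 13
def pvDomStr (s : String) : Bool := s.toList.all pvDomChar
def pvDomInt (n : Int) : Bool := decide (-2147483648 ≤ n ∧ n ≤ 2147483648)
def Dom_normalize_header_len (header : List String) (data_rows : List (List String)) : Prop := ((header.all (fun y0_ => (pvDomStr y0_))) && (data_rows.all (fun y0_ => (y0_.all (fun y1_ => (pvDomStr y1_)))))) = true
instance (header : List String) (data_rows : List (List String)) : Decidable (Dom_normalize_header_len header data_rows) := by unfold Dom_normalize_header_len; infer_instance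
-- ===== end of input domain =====

-- B replaces A's pad/truncate pass and running 'seen' counter by group-then-scatter: it groups column indices by base name, then writes each group's suffixed names into a preallocated output; same return value, no speed claim.

-- ===== PORT A =====
def normalize_header_len (header : List String) (data_rows : List (List String)) : List String :=
  -- max([len(header)] + [len(r) for r in data_rows] + [1]): Python max of this nonempty list is the running fold
  let max_cols : Int := (data_rows.map (fun r => (r.length : Int)) ++ [(1 : Int)]).foldl max (header.length : Int)
  -- new_header = header[:] then pad / truncate
  let new_header : List String :=
    if (header.length : Int) < max_cols then
      header ++ (PySem.List.pyRange (header.length : Int) max_cols 1).map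
        (fun i => "col_" ++ PySem.Int.toStr (i + 1))
    else if max_cols < (header.length : Int) then
      PySem.List.slice header none (some max_cols)
    else header
  -- dedup loop: writes new_header[i] = n in index order, i.e. rebuilds the list left to right
  ((PySem.List.enumerate new_header 0).foldl
      (fun (st : PySem.Dict String Int × List String) (p : Int × String) =>
        let n := if p.2 = "" then "col_" ++ PySem.Int.toStr (p.1 + 1) else p.2
        match st.1.get? n with
        | some c => (st.1.insert n (c + 1), st.2 ++ [n ++ "_" ++ PySem.Int.toStr (c + 1)])
        | none => (st.1.insert n 1, st.2 ++ [n]))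
      (PySem.Dict.empty, [])).2

-- ===== PORT B =====
def normalize_header_len_alt (header : List String) (data_rows : List (List String)) : List String :=
  let max_cols : Int := (data_rows.map (fun r => (r.length : Int)) ++ [(1 : Int)]).foldl max (header.length : Int)
  -- bases = [(header[i] if i < len(header) else "") or f"col_{i+1}" for i in range(max_cols)]
  -- (the guard i < len(header) makes pyGet? a some, so getD "" is inert)
  let bases : List String := (PySem.List.pyRange 0 max_cols 1).map (fun i =>
      let name := if i < (header.length : Int) then (PySem.List.pyGet? header i).getD "" else ""
      if name = "" then "col_" ++ PySem.Int.toStr (i + 1) else name)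
  -- groups: for i, b in enumerate(bases): groups[b] = groups[b] + [i] (new key starts [i])
  let groups : PySem.Dict String (List Int) :=
    (PySem.List.enumerate bases 0).foldl
      (fun (g : PySem.Dict String (List Int)) (p : Int × String) =>
        match g.get? p.2 with
        | some l => g.insert p.2 (l ++ [p.1])
        | none => g.insert p.2 [p.1])
      PySem.Dict.empty
  -- out = [None] * max_cols; "" is the placeholder (every slot is written: proved below)
  let out0 : List String := List.replicate max_cols.toNat ""
  -- for name, idxs in groups.items(): for k, idx in enumerate(idxs): out[idx] = name if k == 0 else f"{name}_{k+1}"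
  -- out[idx] = v is ported as List.set idx.toNat v — exact here: every written idx satisfies 0 ≤ idx < len(out) (proved below)
  groups.items.foldl
    (fun (out : List String) (pr : String × List Int) =>
      (PySem.List.enumerate pr.2 0).foldl
        (fun (out : List String) (q : Int × Int) =>
          out.set q.2.toNat (if q.1 = 0 then pr.1 else pr.1 ++ "_" ++ PySem.Int.toStr (q.1 + 1)))
        out)
    out0

-- ===== PRECONDITION & SPEC =====
def Spec_normalize_header_len (header : List String) (data_rows : List (List String)) (out : List String) : Prop := out = normalize_header_len_alt header data_rows
instance (header : List String) (data_rows : List (List String)) (out : List String) : Decidable (Spec_normalize_header_len header data_rows out) := by unfold Spec_normalize_header_len; infer_instance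

-- ===== CLAIM (what is proved, stated in full; the proofs are below) =====
def Claim_equal_normalize_header_len : Prop := ∀ (header : List String) (data_rows : List (List String)), Dom_normalize_header_len header data_rows → Spec_normalize_header_len header data_rows (normalize_header_len header data_rows)

-- ===== LEMMAS AND PROOFS =====

-- the finished name of a column whose base is b and which has k earlier occurrences of b
def nhlVal (k : Nat) (b : String) : String :=
  if k = 0 then b else b ++ "_" ++ PySem.Int.toStr ((k : Int) + 1)

def nhlCol (i : Int) : String := "col_" ++ PySem.Int.toStr (i + 1)

-- the column-name choices made by the two ports, as standalone functions
def nhlG (p : Int × String) : String := if p.2 = "" then nhlCol p.1 else p.2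

def nhlF (header : List String) (i : Int) : String :=
  let name := if i < (header.length : Int) then (PySem.List.pyGet? header i).getD "" else ""
  if name = "" then nhlCol i else name

-- A's dedup step, acting on the already-chosen base name
def nhlDD (st : PySem.Dict String Int × List String) (n : String) : PySem.Dict String Int × List String :=
  match st.1.get? n with
  | some c => (st.1.insert n (c + 1), st.2 ++ [n ++ "_" ++ PySem.Int.toStr (c + 1)])
  | none => (st.1.insert n 1, st.2 ++ [n])

-- B's grouping step
def nhlStep (g : PySem.Dict String (List Int)) (p : Int × String) : PySem.Dict String (List Int) :=
  match g.get? p.2 with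
  | some l => g.insert p.2 (l ++ [p.1])
  | none => g.insert p.2 [p.1]

-- the common meaning of both mechanisms: each base, suffixed by its earlier-occurrence count
def dedupRel (pre bs : List String) : List String :=
  match bs with
  | [] => []
  | b :: t => nhlVal (pre.count b) b :: dedupRel (pre ++ [b]) t

-- the 0-based positions of b in bs, as Ints
def occIdx (bs : List String) (b : String) : List Int :=
  ((PySem.List.enumerate bs 0).filter (fun q => q.2 == b)).map (·.1)

-- the value B must place at column j
def nhlTarget (bs : List String) (j : Nat) : String :=
  nhlVal ((bs.take j).count (bs.getD j "")) (bs.getD j "")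

theorem nhlCol_ne_empty (i : Int) : nhlCol i ≠ "" := by
  intro h
  have := congrArg String.toList h
  simp [nhlCol] at this

theorem nhl_pad_maps (L : Int) (k : Nat) (header : List String) (hL : (header.length : Int) ≤ L) :
    (PySem.List.enumerate ((PySem.List.pyRange L (L + k) 1).map nhlCol) L).map nhlG
      = (PySem.List.pyRange L (L + k) 1).map (nhlF header) := by
  induction k generalizing L with
  | zero => simp [PySem.List.pyRange_one_eq_nil, PySem.List.enumerate_nil]
  | succ k ih =>
    have hlt : L < L + (k + 1 : Nat) := by push_cast; omega
    rw [PySem.List.pyRange_one_cons hlt]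
    have : (L + (k + 1 : Nat) : Int) = (L + 1) + (k : Nat) := by push_cast; omega
    rw [this]
    simp only [List.map_cons, PySem.List.enumerate_cons]
    rw [ih (L + 1) (by omega)]
    congr 1
    have hni : ¬ L < (header.length : Int) := by omega
    simp [nhlG, nhlF, nhlCol_ne_empty L, hni]

-- A's padded header, enumerated and run through A's name choice, is B's bases list
theorem nhl_lists_eq (header : List String) (m : Int)
    (hL : (header.length : Int) ≤ m) :
    (PySem.List.enumerate
        (header ++ (PySem.List.pyRange (header.length : Int) m 1).map nhlCol) 0).map nhlG
      = (PySem.List.pyRange 0 m 1).map (nhlF header) := by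
  rw [PySem.List.enumerate_append, List.map_append]
  rw [PySem.List.pyRange_one_append 0 (header.length : Int) m (by positivity) hL, List.map_append]
  congr 1
  · rw [PySem.List.enumerate_eq_map_pyRange header "", List.map_map]
    apply List.map_congr_left
    intro j hj
    have hj' := (PySem.List.mem_pyRange_one).1 hj
    have hjlt : j < (header.length : Int) := hj'.2
    have hget : (PySem.List.pyGet? header j).getD "" = PySem.List.pyGetD header j "" := rfl
    simp only [Function.comp_apply, nhlG, nhlF, hjlt, if_pos, hget]
  · have hm : m = (header.length : Int) + ((m - (header.length : Int)).toNat : Nat) := by omega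
    rw [hm]
    have := nhl_pad_maps (header.length : Int) ((m - (header.length : Int)).toNat) header le_rfl
    simpa using this

-- A's counter-dict fold computes dedupRel: the dict always holds the prefix count of each seen base
theorem nhl_foldA (bs : List String) : ∀ (pre acc : List String) (d : PySem.Dict String Int),
    (∀ b, d.get? b = if pre.count b = 0 then none else some (pre.count b : Int)) →
    (bs.foldl nhlDD (d, acc)).2 = acc ++ dedupRel pre bs := by
  induction bs with
  | nil => intro pre acc d _; simp [dedupRel]
  | cons b t ih =>
    intro pre acc d hd
    simp only [List.foldl_cons, dedupRel]
    rcases h0 : pre.count b with _ | c0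
    · -- first occurrence of b
      have hget : d.get? b = none := by rw [hd b, h0]; simp
      have step : nhlDD (d, acc) b = (d.insert b 1, acc ++ [b]) := by
        simp [nhlDD, hget]
      rw [step, ih (pre ++ [b]) (acc ++ [b]) (d.insert b 1) ?_]
      · simp [nhlVal]
      · intro b'
        by_cases hb : b' = b
        · subst hb
          rw [PySem.Dict.get?_insert_self]
          simp [List.count_append, h0]
        · rw [PySem.Dict.get?_insert_of_ne _ _ hb, hd b']
          have hb' : ¬ b = b' := fun h => hb h.symm
          simp [List.count_append, hb']
    · -- repeated base: suffix with the running count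
      have hget : d.get? b = some ((c0 + 1 : Nat) : Int) := by
        rw [hd b, h0]; simp
      have step : nhlDD (d, acc) b
          = (d.insert b (((c0 + 1 : Nat) : Int) + 1), acc ++ [b ++ "_" ++ PySem.Int.toStr (((c0 + 1 : Nat) : Int) + 1)]) := by
        simp [nhlDD, hget]
      rw [step, ih (pre ++ [b]) _ _ ?_]
      · have hv : nhlVal (c0 + 1) b = b ++ "_" ++ PySem.Int.toStr (((c0 + 1 : Nat) : Int) + 1) := by
          simp [nhlVal]
        simp [hv]
      · intro b'
        by_cases hb : b' = b
        · subst hb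
          rw [PySem.Dict.get?_insert_self]
          have hc : (pre ++ [b']).count b' = c0 + 2 := by simp [List.count_append, h0]
          rw [hc]; simp; ring
        · rw [PySem.Dict.get?_insert_of_ne _ _ hb, hd b']
          have hb' : ¬ b = b' := fun h => hb h.symm
          simp [List.count_append, hb']

-- occIdx under appending one element
theorem occIdx_append_singleton (bs : List String) (x b : String) :
    occIdx (bs ++ [x]) b = occIdx bs b ++ (if x = b then [(bs.length : Int)] else []) := by
  unfold occIdx
  rw [PySem.List.enumerate_append, List.filter_append, List.map_append]
  congr 1
  by_cases hx : x = b <;>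
    simp [PySem.List.enumerate_cons, PySem.List.enumerate_nil, List.filter, hx]

theorem occIdx_eq_nil_of_not_mem (bs : List String) (b : String) (hb : b ∉ bs) :
    occIdx bs b = [] := by
  unfold occIdx
  rw [List.map_eq_nil_iff, List.filter_eq_nil_iff]
  intro q hq
  rcases (PySem.List.mem_enumerate_iff _ _ _).1 hq with ⟨k, hk, rfl⟩
  simp only [beq_iff_eq]
  intro h
  exact hb (h ▸ List.getElem_mem hk)

theorem countP_snd_enumerate (bs : List String) (b : String) :
    ∀ s : Int, List.countP (fun q => q.2 == b) (PySem.List.enumerate bs s) = bs.count b := by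
  induction bs with
  | nil => intro s; simp [PySem.List.enumerate_nil]
  | cons x t ih =>
    intro s
    simp [PySem.List.enumerate_cons, List.countP_cons, List.count_cons, ih]

theorem length_occIdx (bs : List String) (b : String) :
    (occIdx bs b).length = bs.count b := by
  unfold occIdx
  rw [List.length_map, ← List.countP_eq_length_filter]
  exact countP_snd_enumerate bs b 0

-- each k-th entry of occIdx bs b is a position i with base b and exactly k earlier occurrences
theorem occIdx_spec (bs : List String) (b : String) :
    ∀ (k : Nat), k < (occIdx bs b).length →
      ∃ iN : Nat, (occIdx bs b)[k]? = some (iN : Int) ∧ iN < bs.length ∧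
        bs.getD iN "" = b ∧ (bs.take iN).count b = k := by
  induction bs using List.reverseRecOn with
  | nil => intro k hk; simp [occIdx, PySem.List.enumerate_nil] at hk
  | append_singleton bs x ih =>
    intro k hk
    rw [occIdx_append_singleton] at hk ⊢
    by_cases hklt : k < (occIdx bs b).length
    · rcases ih k hklt with ⟨iN, hget, hlt, hbase, hcnt⟩
      refine ⟨iN, ?_, by simp; omega, ?_, ?_⟩
      · rw [List.getElem?_append_left hklt, hget]
      · rw [List.getD_append _ _ _ _ hlt, hbase]
      · rw [List.take_append_of_le_length (by omega), hcnt]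
    · -- k is the appended position (only possible when x = b)
      have hx : x = b := by
        by_contra hxb
        simp [hxb] at hk
        omega
      subst hx
      have hkeq : k = (occIdx bs x).length := by
        simp at hk
        omega
      refine ⟨bs.length, ?_, by simp, ?_, ?_⟩
      · rw [List.getElem?_append_right (by omega), hkeq]
        simp
      · simp
      · rw [List.take_left, ← length_occIdx, hkeq]

-- the groups dict is exactly: each distinct base (first-occurrence order) with all its positions
theorem nhl_groups (bs : List String) :
    ((PySem.List.enumerate bs 0).foldl nhlStep PySem.Dict.empty).items
      = (PySem.List.dedup bs).map (fun b => (b, occIdx bs b)) := by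
  induction bs using List.reverseRecOn with
  | nil =>
    show (PySem.Dict.empty : PySem.Dict String (List Int)).items = _
    simp [PySem.List.dedup]
    rfl
  | append_singleton bs x ih =>
    rw [PySem.List.enumerate_append, List.foldl_append]
    simp only [PySem.List.enumerate_cons, PySem.List.enumerate_nil, List.foldl_cons, List.foldl_nil]
    set d := (PySem.List.enumerate bs 0).foldl nhlStep PySem.Dict.empty with hd
    have hkeys : d.keys = PySem.List.dedup bs := by
      show d.items.map Prod.fst = _
      rw [ih, List.map_map]
      have hcomp : (Prod.fst ∘ fun b => (b, occIdx bs b)) = id := rfl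
      rw [hcomp, List.map_id]
    have hnd : d.keys.Nodup := by rw [hkeys]; exact PySem.List.nodup_dedup bs
    by_cases hx : x ∈ bs
    · -- existing key: its position list gets the new index appended, dedup unchanged
      have hmem : (x, occIdx bs x) ∈ d.items := by
        rw [ih]
        exact List.mem_map_of_mem ((PySem.List.mem_dedup _ _).2 hx)
      have hget : d.get? x = some (occIdx bs x) :=
        PySem.Dict.get?_of_mem_items d hmem hnd
      have hcont : d.contains x = true := by
        rw [PySem.Dict.contains_eq_decide_mem_keys, hkeys]
        simp [hx]
      rw [show nhlStep d (0 + (bs.length : Int), x) = d.insert x (occIdx bs x ++ [0 + (bs.length : Int)]) by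
        simp [nhlStep, hget]]
      rw [PySem.Dict.items_insert_of_contains d _ hcont, ih, List.map_map]
      have hded : PySem.List.dedup (bs ++ [x]) = PySem.List.dedup bs := by
        simp only [PySem.List.dedup_eq_ofList, PySem.Set.ofList_append_singleton]
        exact PySem.Set.add_of_mem ((PySem.Set.mem_ofList _ _).2 hx)
      rw [hded]
      apply List.map_congr_left
      intro b hb
      by_cases hbx : b = x
      · subst hbx
        simp [occIdx_append_singleton]
      · have : ¬ x = b := fun h => hbx h.symm
        simp [Function.comp, hbx, occIdx_append_singleton, this]
    · -- new key: appended at the end, dedup grows by x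
      have hget : d.get? x = none := by
        rw [PySem.Dict.get?_eq_none_iff_not_mem_keys, hkeys]
        simp [hx]
      have hcont : d.contains x = false := by
        rw [PySem.Dict.contains_eq_decide_mem_keys, hkeys]
        simp [hx]
      rw [show nhlStep d (0 + (bs.length : Int), x) = d.insert x [0 + (bs.length : Int)] by
        simp [nhlStep, hget]]
      rw [PySem.Dict.items_insert_of_not_contains d _ hcont, ih]
      have hded : PySem.List.dedup (bs ++ [x]) = PySem.List.dedup bs ++ [x] := by
        simp only [PySem.List.dedup_eq_ofList, PySem.Set.ofList_append_singleton]
        exact PySem.Set.add_of_not_mem (fun h => hx ((PySem.Set.mem_ofList _ _).1 h))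
      rw [hded, List.map_append]
      congr 1
      · apply List.map_congr_left
        intro b hb
        have hbbs : b ∈ bs := (PySem.List.mem_dedup _ _).1 hb
        have : ¬ x = b := fun h => hx (h ▸ hbbs)
        simp [occIdx_append_singleton, this]
      · simp [occIdx_append_singleton, occIdx_eq_nil_of_not_mem bs x hx]

-- the scatter loop: writing target values at their own indices fills every covered slot with its target
theorem nhl_scatter (tgt : Nat → String) :
    ∀ (W : List (Int × String)) (out : List String),
      (∀ w ∈ W, ∃ i : Nat, w.1 = (i : Int) ∧ i < out.length ∧ w.2 = tgt i) →
      (W.foldl (fun o w => o.set w.1.toNat w.2) out).length = out.length ∧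
      ∀ j : Nat, j < out.length →
        (W.foldl (fun o w => o.set w.1.toNat w.2) out).getD j ""
          = (if (j : Int) ∈ W.map Prod.fst then tgt j else out.getD j "") := by
  intro W
  induction W with
  | nil => intro out _; simp
  | cons w W' ih =>
    intro out hW
    rcases hW w (by simp) with ⟨i, hw1, hilt, hw2⟩
    have hW' : ∀ w' ∈ W', ∃ i : Nat, w'.1 = (i : Int) ∧ i < (out.set w.1.toNat w.2).length ∧ w'.2 = tgt i := by
      intro w' hw'
      rcases hW w' (by simp [hw']) with ⟨i', h1, h2, h3⟩
      exact ⟨i', h1, by simpa using h2, h3⟩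
    rcases ih (out.set w.1.toNat w.2) hW' with ⟨hlen, hget⟩
    refine ⟨by simpa using hlen, ?_⟩
    intro j hj
    rw [List.foldl_cons, hget j (by simpa using hj)]
    by_cases hmem : (j : Int) ∈ W'.map Prod.fst
    · simp [hmem]
    · have hset : (out.set w.1.toNat w.2).getD j "" = if j = i then tgt i else out.getD j "" := by
        rw [hw1, hw2]
        by_cases hji : j = i
        · subst hji
          simp [List.getD_eq_getElem?_getD, List.getElem?_set_self hilt]
        · have : i ≠ j := fun h => hji h.symm
          simp [List.getD_eq_getElem?_getD, List.getElem?_set_ne, this]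
          exact fun h => absurd h hji
      rw [hset]
      by_cases hji : j = i
      · subst hji
        simp [hmem, hw1]
      · have : ¬ (j : Int) = w.1 := by
          rw [hw1]
          exact fun h => hji (by exact_mod_cast h)
        simp [hmem, this, hji]

-- dedupRel, read at a position
theorem dedupRel_length (bs : List String) : ∀ pre, (dedupRel pre bs).length = bs.length := by
  induction bs with
  | nil => intro pre; simp [dedupRel]
  | cons b t ih => intro pre; simp [dedupRel, ih]

theorem dedupRel_getD (bs : List String) :
    ∀ (pre : List String) (j : Nat), j < bs.length →
      (dedupRel pre bs).getD j "" = nhlVal ((pre ++ bs.take j).count (bs.getD j "")) (bs.getD j "") := by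
  induction bs with
  | nil => intro pre j hj; simp at hj
  | cons b t ih =>
    intro pre j hj
    match j with
    | 0 => simp [dedupRel]
    | j + 1 =>
      have hj' : j < t.length := by simpa using hj
      simp only [dedupRel, List.getD_cons_succ, List.take_succ_cons]
      rw [ih (pre ++ [b]) j hj']
      simp

-- folding over a flatMap is the nested fold
theorem foldl_flatMap_eq {α β γ : Type} (l : List α) (f : α → List β) (g : γ → β → γ) :
    ∀ (init : γ), l.foldl (fun acc x => (f x).foldl g acc) init = (l.flatMap f).foldl g init := by
  induction l with
  | nil => intro init; simp
  | cons x l ih => intro init; simp [List.foldl_append, ih]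

-- ===== VERDICT (by name: the statement is the Claim_ definition above) =====
theorem normalize_header_len_spec : Claim_equal_normalize_header_len := by
  intro header data_rows _
  unfold Spec_normalize_header_len
  simp only [normalize_header_len, normalize_header_len_alt]
  set m : Int := (data_rows.map (fun r => (r.length : Int)) ++ [(1 : Int)]).foldl max (header.length : Int) with hm
  have hbounds := PySem.List.le_foldl_max (data_rows.map (fun r => (r.length : Int)) ++ [(1 : Int)]) (header.length : Int)
  have hL : (header.length : Int) ≤ m := hbounds.1
  have h1 : (1 : Int) ≤ m := hbounds.2 1 (by simp)
  have hfun : (fun (i : Int) =>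
      let name := if i < (header.length : Int) then (PySem.List.pyGet? header i).getD "" else ""
      if name = "" then "col_" ++ PySem.Int.toStr (i + 1) else name) = nhlF header := rfl
  rw [hfun]
  set bases : List String := (PySem.List.pyRange 0 m 1).map (nhlF header) with hbases
  have hblen : bases.length = m.toNat := by
    rw [hbases, List.length_map, PySem.List.length_pyRange_one]
    simp
  -- ===== A's side: fold of nhlDD over the common bases list =====
  have hnh : (if (header.length : Int) < m then
        header ++ (PySem.List.pyRange (header.length : Int) m 1).map
          (fun i => "col_" ++ PySem.Int.toStr (i + 1))
      else if m < (header.length : Int) then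
        PySem.List.slice header none (some m)
      else header)
      = header ++ (PySem.List.pyRange (header.length : Int) m 1).map nhlCol := by
    rcases lt_or_eq_of_le hL with h | h
    · simp [h, nhlCol]
    · simp [← h, PySem.List.pyRange_one_eq_nil]
  rw [hnh]
  have hA : ((PySem.List.enumerate (header ++ (PySem.List.pyRange (header.length : Int) m 1).map nhlCol) 0).foldl
      (fun (st : PySem.Dict String Int × List String) (p : Int × String) =>
        let n := if p.2 = "" then "col_" ++ PySem.Int.toStr (p.1 + 1) else p.2
        match st.1.get? n with
        | some c => (st.1.insert n (c + 1), st.2 ++ [n ++ "_" ++ PySem.Int.toStr (c + 1)])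
        | none => (st.1.insert n 1, st.2 ++ [n]))
      (PySem.Dict.empty, [])).2 = dedupRel [] bases := by
    have h1 : ((PySem.List.enumerate (header ++ (PySem.List.pyRange (header.length : Int) m 1).map nhlCol) 0).map nhlG).foldl
        nhlDD (PySem.Dict.empty, [])
        = (PySem.List.enumerate (header ++ (PySem.List.pyRange (header.length : Int) m 1).map nhlCol) 0).foldl
          (fun (st : PySem.Dict String Int × List String) (p : Int × String) =>
            let n := if p.2 = "" then "col_" ++ PySem.Int.toStr (p.1 + 1) else p.2
            match st.1.get? n with
            | some c => (st.1.insert n (c + 1), st.2 ++ [n ++ "_" ++ PySem.Int.toStr (c + 1)])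
            | none => (st.1.insert n 1, st.2 ++ [n]))
          (PySem.Dict.empty, []) := by
      rw [List.foldl_map]; rfl
    rw [← h1, nhl_lists_eq header m hL, ← hbases,
        nhl_foldA bases [] [] PySem.Dict.empty (by intro b; simp [PySem.Dict.get?_empty])]
    simp
  rw [hA]
  -- ===== B's side: group then scatter =====
  have hstep : (fun (g : PySem.Dict String (List Int)) (p : Int × String) =>
      match g.get? p.2 with
      | some l => g.insert p.2 (l ++ [p.1])
      | none => g.insert p.2 [p.1]) = nhlStep := rfl
  rw [hstep]
  set groups := (PySem.List.enumerate bases 0).foldl nhlStep PySem.Dict.empty with hgroups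
  set out0 : List String := List.replicate m.toNat "" with hout0
  -- the nested scatter loop as one fold over the flattened write list
  set W : List (Int × String) := groups.items.flatMap
      (fun pr => (PySem.List.enumerate pr.2 0).map
        (fun q => (q.2, if q.1 = 0 then pr.1 else pr.1 ++ "_" ++ PySem.Int.toStr (q.1 + 1)))) with hW
  have hflat : groups.items.foldl
      (fun (out : List String) (pr : String × List Int) =>
        (PySem.List.enumerate pr.2 0).foldl
          (fun (out : List String) (q : Int × Int) =>
            out.set q.2.toNat (if q.1 = 0 then pr.1 else pr.1 ++ "_" ++ PySem.Int.toStr (q.1 + 1)))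
          out)
      out0
      = W.foldl (fun o w => o.set w.1.toNat w.2) out0 := by
    rw [hW, ← foldl_flatMap_eq]
    have : (fun (out : List String) (pr : String × List Int) =>
        ((PySem.List.enumerate pr.2 0).map
          (fun q => (q.2, if q.1 = 0 then pr.1 else pr.1 ++ "_" ++ PySem.Int.toStr (q.1 + 1)))).foldl
          (fun o w => o.set w.1.toNat w.2) out)
        = (fun (out : List String) (pr : String × List Int) =>
        (PySem.List.enumerate pr.2 0).foldl
          (fun (out : List String) (q : Int × Int) =>
            out.set q.2.toNat (if q.1 = 0 then pr.1 else pr.1 ++ "_" ++ PySem.Int.toStr (q.1 + 1)))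
          out) := by
      funext out pr
      rw [List.foldl_map]
    rw [← this]
  rw [hflat]
  -- each write puts the target value at its own in-range index
  have hWspec : ∀ w ∈ W, ∃ i : Nat, w.1 = (i : Int) ∧ i < out0.length ∧ w.2 = nhlTarget bases i := by
    intro w hw
    rw [hW, List.mem_flatMap] at hw
    rcases hw with ⟨pr, hpr, hwm⟩
    rw [hgroups, nhl_groups, List.mem_map] at hpr
    rcases hpr with ⟨b, hb, rfl⟩
    rw [List.mem_map] at hwm
    rcases hwm with ⟨q, hq, rfl⟩
    rcases (PySem.List.mem_enumerate_iff _ _ _).1 hq with ⟨k, hk, rfl⟩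
    rcases occIdx_spec bases b k hk with ⟨iN, hget?, hlt, hbase, hcnt⟩
    have hget : (occIdx bases b)[k] = (iN : Int) := by
      rw [List.getElem?_eq_getElem hk] at hget?
      exact Option.some_inj.mp hget?
    refine ⟨iN, by simpa using hget, by simp [hout0]; omega, ?_⟩
    show (if (0 + (k : Int)) = 0 then b else b ++ "_" ++ PySem.Int.toStr ((0 + (k : Int)) + 1)) = _
    rw [nhlTarget, hbase, hcnt, nhlVal]
    by_cases hk0 : k = 0
    · subst hk0; simp
    · simp [hk0]
  rcases nhl_scatter (nhlTarget bases) W out0 hWspec with ⟨hlen, hget⟩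
  -- every column index is covered by some write
  have hcov : ∀ j : Nat, j < bases.length → (j : Int) ∈ W.map Prod.fst := by
    intro j hj
    set b := bases.getD j "" with hb
    have hbmem : b ∈ bases := by
      rw [hb, List.getD_eq_getElem _ _ hj]
      exact List.getElem_mem hj
    have hjo : (j : Int) ∈ occIdx bases b := by
      unfold occIdx
      rw [List.mem_map]
      refine ⟨(0 + (j : Int), bases[j]), ?_, by simp⟩
      rw [List.mem_filter]
      constructor
      · exact (PySem.List.mem_enumerate_iff _ _ _).2 ⟨j, hj, rfl⟩
      · show (bases[j] == b) = true
        rw [hb, List.getD_eq_getElem _ _ hj]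
        simp
    rcases List.mem_iff_getElem.1 hjo with ⟨k, hk, hkj⟩
    rw [List.mem_map]
    refine ⟨((j : Int), if (0 + (k : Int)) = 0 then b else b ++ "_" ++ PySem.Int.toStr ((0 + (k : Int)) + 1)), ?_, rfl⟩
    rw [hW, List.mem_flatMap]
    refine ⟨(b, occIdx bases b), ?_, ?_⟩
    · rw [hgroups, nhl_groups]
      exact List.mem_map_of_mem ((PySem.List.mem_dedup _ _).2 hbmem)
    · rw [List.mem_map]
      exact ⟨(0 + (k : Int), (j : Int)), (PySem.List.mem_enumerate_iff _ _ _).2 ⟨k, hk, by rw [hkj]⟩, rfl⟩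
  -- lengths agree, entries agree: conclude by extensionality
  have hlen2 : (dedupRel [] bases).length = (W.foldl (fun o w => o.set w.1.toNat w.2) out0).length := by
    rw [dedupRel_length, hlen, hout0, List.length_replicate, hblen]
  apply List.ext_getElem hlen2
  intro j hj1 hj2
  have hjb : j < bases.length := by rwa [dedupRel_length] at hj1
  have e1 : (dedupRel [] bases)[j] = (dedupRel [] bases).getD j "" := by
    rw [List.getD_eq_getElem _ _ hj1]
  have e2 : (W.foldl (fun o w => o.set w.1.toNat w.2) out0)[j]
      = (W.foldl (fun o w => o.set w.1.toNat w.2) out0).getD j "" := by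
    rw [List.getD_eq_getElem _ _ hj2]
  rw [e1, e2, dedupRel_getD bases [] j hjb,
      hget j (by rw [hout0, List.length_replicate, ← hblen]; exact hjb)]
  rw [if_pos (hcov j hjb)]
  simp [nhlTarget]
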